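-- pv_equiv track=rewrite | github.com/dwlmt/Story-Untangling | story_untangling/modules/sampled_softmax.py | accidental_match
-- ===== SOURCE A (Python) =====
-- def accidental_match(labels, samples):
--     sample_dict = dict()
--
--     for idx in range(len(samples)):
--         sample_dict[samples[idx]] = idx
--
--     result = list()
--     for idx in range(len(labels)):
--         if labels[idx] in sample_dict:
--             result.append((idx, sample_dict[labels[idx]]))
--
--     return result
-- ===== SOURCE B (Python) =====
-- def accidental_match(labels, samples):
--     # Inverted nesting: one pass over samples; each sample index j overwrites the
--     # slot of every label it equals, so slots end holding the LAST matching index.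
--     best = [None] * len(labels)
--     for j in range(len(samples)):
--         s = samples[j]
--         for i in range(len(labels)):
--             if labels[i] == s:
--                 best[i] = j
--     return [(i, b) for i, b in enumerate(best) if b is not None]
-- ===== Notes on version B (the rewrite author's own statement) =====
-- stated objective: alternative
-- what changed: Inverts the data flow: instead of building a value-to-last-index dict and looking labels up, B makes one pass over samples, each index overwriting a per-label slot array (so slots keep the last match), then emits the filled slots in label order.
import Mathlib
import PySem

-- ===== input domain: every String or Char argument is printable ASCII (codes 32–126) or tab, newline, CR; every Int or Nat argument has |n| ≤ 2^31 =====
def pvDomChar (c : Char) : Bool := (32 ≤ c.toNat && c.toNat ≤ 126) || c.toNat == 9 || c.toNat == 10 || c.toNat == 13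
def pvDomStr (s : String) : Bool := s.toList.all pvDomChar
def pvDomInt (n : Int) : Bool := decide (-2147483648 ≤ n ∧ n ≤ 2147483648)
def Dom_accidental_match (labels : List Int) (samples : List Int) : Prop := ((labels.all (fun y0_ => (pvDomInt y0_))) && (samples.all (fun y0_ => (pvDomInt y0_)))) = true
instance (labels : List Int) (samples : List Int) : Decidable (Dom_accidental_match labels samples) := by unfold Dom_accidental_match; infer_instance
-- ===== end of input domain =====

-- B inverts A's data flow: one pass over samples overwriting a per-label slot array, then the filled
-- slots are emitted in label order; no value->index dict. Same result, no speed claim.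

-- ===== PORT A =====
def accidental_match (labels : List Int) (samples : List Int) : List (Int × Int) :=
  -- sample_dict[samples[idx]] = idx for idx in range(len(samples))
  let d : PySem.Dict Int Int :=
    (PySem.List.enumerate samples).foldl (fun d p => d.insert p.2 p.1) PySem.Dict.empty
  -- for idx in range(len(labels)): if labels[idx] in sample_dict: result.append((idx, sample_dict[labels[idx]]))
  (PySem.List.enumerate labels).foldl
    (fun acc p =>
      match d.get? p.2 with
      | some j => acc ++ [(p.1, j)]
      | none => acc) []

-- ===== PORT B =====
-- inner loop of Source B: 'for i in range(len(labels)): if labels[i] == s: best[i] = j'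
def pvScanLabels (s j : Int) : List Int → List (Option Int) → List (Option Int)
  | l :: ls, b :: bs => (if l = s then some j else b) :: pvScanLabels s j ls bs
  | _, bs => bs

def accidental_match_alt (labels : List Int) (samples : List Int) : List (Int × Int) :=
  -- best = [None] * len(labels); for j, s: inner scan
  let best := (PySem.List.enumerate samples).foldl
    (fun best p => pvScanLabels p.2 p.1 labels best)
    (List.replicate labels.length none)
  -- [(i, b) for i, b in enumerate(best) if b is not None]
  (PySem.List.enumerate best).filterMap
    (fun p => match p.2 with | some j => some (p.1, j) | none => none)

-- ===== PRECONDITION & SPEC =====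
def Spec_accidental_match (labels : List Int) (samples : List Int) (out : List (Int × Int)) : Prop := out = accidental_match_alt labels samples
instance (labels : List Int) (samples : List Int) (out : List (Int × Int)) : Decidable (Spec_accidental_match labels samples out) := by unfold Spec_accidental_match; infer_instance

-- ===== CLAIM =====
def Claim_equal_accidental_match : Prop := ∀ (labels : List Int) (samples : List Int), Dom_accidental_match labels samples → Spec_accidental_match labels samples (accidental_match labels samples)

-- ===== LEMMAS AND PROOFS =====

theorem pvScanLabels_map (s j : Int) (labels : List Int) (f : Int → Option Int) :
    pvScanLabels s j labels (labels.map f)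
      = labels.map (fun l => if l = s then some j else f l) := by
  induction labels with
  | nil => rfl
  | cons l ls ih => simp [pvScanLabels, ih]

theorem pvFoldBest (ps : List (Int × Int)) (labels : List Int) (f : Int → Option Int) :
    ps.foldl (fun best p => pvScanLabels p.2 p.1 labels best) (labels.map f)
      = labels.map (fun l => ps.foldl (fun acc p => if l = p.2 then some p.1 else acc) (f l)) := by
  induction ps generalizing f with
  | nil => rfl
  | cons p rest ih =>
    simp only [List.foldl_cons, pvScanLabels_map]
    exact ih (fun l => if l = p.2 then some p.1 else f l)

theorem pvDictFold (ps : List (Int × Int)) (d0 : PySem.Dict Int Int) (lab : Int) :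
    (ps.foldl (fun d p => d.insert p.2 p.1) d0).get? lab
      = ps.foldl (fun acc p => if lab = p.2 then some p.1 else acc) (d0.get? lab) := by
  induction ps generalizing d0 with
  | nil => rfl
  | cons p rest ih =>
    simp only [List.foldl_cons]
    rw [ih, PySem.Dict.get?_insert]

theorem pvFoldAppend (g : Int → Option Int) (ps : List (Int × Int)) (acc : List (Int × Int)) :
    ps.foldl (fun acc p => match g p.2 with | some j => acc ++ [(p.1, j)] | none => acc) acc
      = acc ++ ps.filterMap (fun p => match g p.2 with | some j => some (p.1, j) | none => none) := by
  induction ps generalizing acc with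
  | nil => simp
  | cons p rest ih =>
    simp only [List.foldl_cons, List.filterMap_cons]
    cases g p.2 <;> simp [ih]

theorem pvEnumMapFilter (F : Int → Option Int) (labels : List Int) (s : Int) :
    (PySem.List.enumerate (labels.map F) s).filterMap
        (fun p => match p.2 with | some j => some (p.1, j) | none => none)
      = (PySem.List.enumerate labels s).filterMap
        (fun p => match F p.2 with | some j => some (p.1, j) | none => none) := by
  induction labels generalizing s with
  | nil => rfl
  | cons l ls ih =>
    simp only [List.map_cons, PySem.List.enumerate_cons, List.filterMap_cons, ih]

-- ===== VERDICT =====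
theorem accidental_match_spec : Claim_equal_accidental_match := by
  intro labels samples _
  unfold Spec_accidental_match accidental_match accidental_match_alt
  have hrep : (List.replicate labels.length (none : Option Int))
      = labels.map (fun _ => none) := by simp
  rw [hrep, pvFoldBest, pvEnumMapFilter]
  have hg : ∀ lab : Int,
      ((PySem.List.enumerate samples).foldl (fun d p => d.insert p.2 p.1) PySem.Dict.empty).get? lab
        = (PySem.List.enumerate samples).foldl
            (fun acc p => if lab = p.2 then some p.1 else acc) none := by
    intro lab
    rw [pvDictFold, PySem.Dict.get?_empty]
  simp only [hg]
  simpa using pvFoldAppend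
    (fun lab => (PySem.List.enumerate samples).foldl
      (fun acc p => if lab = p.2 then some p.1 else acc) none)
    (PySem.List.enumerate labels) []
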